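-- pv_equiv track=rewrite | github.com/luftj/pocc | pocc.py | find_actual_class_change
-- ===== SOURCE A (Python) =====
-- def find_actual_class_change(interval, class_breaks):
--     class_breaks = sorted(class_breaks)
--
--     # find classes of interval endpoints
--     start = 0
--     end = 0
--     for i,x in enumerate([*class_breaks]):
--         if min(interval) > x:
--             start = i+1
--         if max(interval) > x:
--             end = i+1
--
--     return end-start # return class change
-- ===== SOURCE B (Python) =====
-- def find_actual_class_change(interval, class_breaks):
--     mn = min(interval)
--     mx = max(interval)
--     lo = 0
--     hi = 0
--     for x in class_breaks:
--         if x < mn: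
--             lo += 1
--         if x < mx:
--             hi += 1
--     return hi - lo
-- ===== Notes on version B (the rewrite author's own statement) =====
-- stated objective: faster
-- what changed: B drops A's sort and enumerate/index bookkeeping: it computes min/max of the interval once and in one pass counts the breaks strictly below each endpoint, returning the difference of the two counts.
-- outside the precondition, e.g. on find_actual_class_change([], []): A returns 0, B raises ValueError
import Mathlib
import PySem

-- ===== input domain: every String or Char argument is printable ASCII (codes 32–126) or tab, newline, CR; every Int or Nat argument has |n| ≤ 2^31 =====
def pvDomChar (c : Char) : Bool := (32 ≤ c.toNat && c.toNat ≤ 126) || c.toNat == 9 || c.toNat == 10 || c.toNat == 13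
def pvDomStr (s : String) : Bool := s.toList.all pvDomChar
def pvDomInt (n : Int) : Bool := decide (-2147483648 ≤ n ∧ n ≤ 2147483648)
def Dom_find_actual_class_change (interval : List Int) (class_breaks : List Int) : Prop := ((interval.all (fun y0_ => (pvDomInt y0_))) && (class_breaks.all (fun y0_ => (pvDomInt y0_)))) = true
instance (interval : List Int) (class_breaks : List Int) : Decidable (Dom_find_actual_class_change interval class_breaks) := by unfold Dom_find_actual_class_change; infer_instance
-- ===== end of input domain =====

-- B replaces A's sort-then-scan with one counting pass below min and max of the interval (faster).

-- ===== PORT A =====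
def find_actual_class_change (interval : List Int) (class_breaks : List Int) : Int :=
  let cb := PySem.List.sorted class_breaks (fun x => x) false
  let p := (PySem.List.enumerate cb 0).foldl
    (fun (se : Int × Int) ix =>
      ((if (PySem.List.min? interval (fun y => y)).any (fun m => decide (m > ix.2)) then ix.1 + 1 else se.1),
       (if (PySem.List.max? interval (fun y => y)).any (fun m => decide (m > ix.2)) then ix.1 + 1 else se.2)))
    (0, 0)
  p.2 - p.1

-- ===== PORT B =====
def find_actual_class_change_alt (interval : List Int) (class_breaks : List Int) : Int :=
  match PySem.List.min? interval (fun y => y), PySem.List.max? interval (fun y => y) with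
  | some mn, some mx =>
      let p := class_breaks.foldl
        (fun (lh : Int × Int) x =>
          ((if x < mn then lh.1 + 1 else lh.1), (if x < mx then lh.2 + 1 else lh.2)))
        (0, 0)
      p.2 - p.1
  | _, _ => 0   -- unreachable under Pre_: Python B raises ValueError on an empty interval

-- ===== PRECONDITION & SPEC =====
-- Pre_ excludes an empty interval: there A raises ValueError (min of an empty sequence) whenever
-- class_breaks is nonempty, and the 0 it returns when class_breaks is also empty is an accident of
-- the loop never running; B's min(interval) raises on every empty interval.
def Pre_find_actual_class_change (interval : List Int) (class_breaks : List Int) : Prop := interval ≠ []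
instance (interval : List Int) (class_breaks : List Int) : Decidable (Pre_find_actual_class_change interval class_breaks) := by unfold Pre_find_actual_class_change; infer_instance
def pvWitness_find_actual_class_change : List Int × List Int := ([3, 7], [1, 2, 5, 8, 9])
def Spec_find_actual_class_change (interval : List Int) (class_breaks : List Int) (out : Int) : Prop := out = find_actual_class_change_alt interval class_breaks
instance (interval : List Int) (class_breaks : List Int) (out : Int) : Decidable (Spec_find_actual_class_change interval class_breaks out) := by unfold Spec_find_actual_class_change; infer_instance

-- ===== CLAIM (what is proved, stated in full; the proofs are below) =====
def Claim_equal_find_actual_class_change : Prop := ∀ (interval : List Int) (class_breaks : List Int), Dom_find_actual_class_change interval class_breaks → Pre_find_actual_class_change interval class_breaks → Spec_find_actual_class_change interval class_breaks (find_actual_class_change interval class_breaks)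

-- ===== LEMMAS AND PROOFS =====

-- A's pair-state scan splits into two independent scans
theorem pv_pairA (mn mx : Int) :
    ∀ (l : List (Int × Int)) (a b : Int),
      l.foldl (fun (se : Int × Int) ix =>
          ((if mn > ix.2 then ix.1 + 1 else se.1), (if mx > ix.2 then ix.1 + 1 else se.2))) (a, b)
        = (l.foldl (fun s ix => if mn > ix.2 then ix.1 + 1 else s) a,
           l.foldl (fun s ix => if mx > ix.2 then ix.1 + 1 else s) b) := by
  intro l
  induction l with
  | nil => intro a b; rfl
  | cons x t ih => intro a b; simp only [List.foldl_cons, ih]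

-- B's pair-state counting pass splits into two independent counters
theorem pv_pairB (mn mx : Int) :
    ∀ (l : List Int) (a b : Int),
      l.foldl (fun (lh : Int × Int) x =>
          ((if x < mn then lh.1 + 1 else lh.1), (if x < mx then lh.2 + 1 else lh.2))) (a, b)
        = (l.foldl (fun c x => if x < mn then c + 1 else c) a,
           l.foldl (fun c x => if x < mx then c + 1 else c) b) := by
  intro l
  induction l with
  | nil => intro a b; rfl
  | cons x t ih => intro a b; simp only [List.foldl_cons, ih]

-- A's index-tracking scan over a sorted list computes the count of elements below m
theorem pv_foldA (m : Int) :
    ∀ (s : List Int), s.Pairwise (· ≤ ·) → ∀ (k a : Int),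
      (PySem.List.enumerate s k).foldl (fun acc ix => if m > ix.2 then ix.1 + 1 else acc) a
        = if s.countP (fun x => decide (x < m)) = 0 then a
          else k + (s.countP (fun x => decide (x < m)) : Int) := by
  intro s
  induction s with
  | nil => intro _ k a; simp [PySem.List.enumerate_nil]
  | cons x t ih =>
    intro hp k a
    have hpt := (List.pairwise_cons.mp hp).2
    have hxt := (List.pairwise_cons.mp hp).1
    rw [PySem.List.enumerate_cons]
    simp only [List.foldl_cons]
    by_cases hx : x < m
    · rw [ih hpt (k + 1)]
      simp only [List.countP_cons, hx]
      by_cases hct : t.countP (fun x => decide (x < m)) = 0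
      · simp [hct]
      · simp only [hct, decide_true]
        have h1 : ¬ (t.countP (fun x => decide (x < m)) + 1 = 0) := by omega
        simp only [if_false]
        push_cast
        ring
    · have hct : t.countP (fun x => decide (x < m)) = 0 := by
        rw [List.countP_eq_zero]
        intro y hy
        have := hxt y hy
        simp only [decide_eq_true_eq]
        omega
      rw [ih hpt (k + 1)]
      simp [hx, hct, gt_iff_lt]

theorem find_actual_class_change_eq (interval class_breaks : List Int)
    (h : interval ≠ []) :
    find_actual_class_change interval class_breaks
      = find_actual_class_change_alt interval class_breaks := by
  obtain ⟨mn, hmn⟩ : ∃ mn, PySem.List.min? interval (fun y => y) = some mn := by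
    cases hmin : PySem.List.min? interval (fun y => y) with
    | none => exact absurd ((PySem.List.min?_eq_none_iff _ _).mp hmin) h
    | some mn => exact ⟨mn, rfl⟩
  obtain ⟨mx, hmx⟩ : ∃ mx, PySem.List.max? interval (fun y => y) = some mx := by
    cases hmax : PySem.List.max? interval (fun y => y) with
    | none => exact absurd ((PySem.List.max?_eq_none_iff _ _).mp hmax) h
    | some mx => exact ⟨mx, rfl⟩
  unfold find_actual_class_change find_actual_class_change_alt
  rw [hmn, hmx]
  simp only [Option.any_some]
  have hsorted : (PySem.List.sorted class_breaks (fun x => x) false).Pairwise (· ≤ ·) := by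
    have := PySem.List.sorted_pairwise (xs := class_breaks) (key := fun x => x)
    simpa using this
  have hperm : (PySem.List.sorted class_breaks (fun x => x) false).Perm class_breaks :=
    PySem.List.sorted_perm class_breaks (fun x => x) false
  simp only [decide_eq_true_eq]
  rw [pv_pairA, pv_pairB]
  rw [pv_foldA mn _ hsorted 0 0, pv_foldA mx _ hsorted 0 0,
      PySem.List.foldl_ite_add_one, PySem.List.foldl_ite_add_one,
      hperm.countP_eq, hperm.countP_eq]
  by_cases h1 : class_breaks.countP (fun x => decide (x < mn)) = 0 <;>
    by_cases h2 : class_breaks.countP (fun x => decide (x < mx)) = 0 <;>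
      simp [h1, h2]

-- ===== VERDICT (by name: the statement is the Claim_ definition above) =====
theorem find_actual_class_change_spec : Claim_equal_find_actual_class_change := by
  intro interval class_breaks _ hpre
  exact find_actual_class_change_eq interval class_breaks hpre
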